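-- pv_equiv track=rewrite | github.com/Kaiwinta/Advent25 | day07/code.py | count_timelines
-- ===== SOURCE A (Python) =====
-- from collections import defaultdict
--
-- def count_timelines(grid):
--     rows = len(grid)
--     cols = len(grid[0])
--     start_col = grid[0].index("S")
--     dp = defaultdict(int)
--     dp[(0, start_col)] = 1
--     finished = 0
--
--     for row in range(rows):
--         next_dp = defaultdict(int)
--         for (r, c), ways in dp.items():
--             if r != row:
--                 continue
--             if r + 1 >= rows:
--                 finished += ways
--                 continue
--             cell = grid[r][c]
--             if cell == "^":
--                 if c - 1 >= 0:
--                     next_dp[(r + 1, c - 1)] += ways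
--                 if c + 1 < cols:
--                     next_dp[(r + 1, c + 1)] += ways
--             else:
--                 next_dp[(r + 1, c)] += ways
--
--         dp = next_dp
--     return finished + sum(dp.values())
-- ===== SOURCE B (Python) =====
-- def count_timelines(grid):
--     cols = len(grid[0])
--     below = [1] * cols
--     for r in range(len(grid) - 2, -1, -1):
--         row = grid[r]
--         cur = []
--         for c in range(cols):
--             if row[c] == "^":
--                 cur.append((below[c - 1] if 1 <= c else 0)
--                            + (below[c + 1] if c + 1 < cols else 0))
--             else:
--                 cur.append(below[c])
--         below = cur
--     return below[grid[0].index("S")]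
-- ===== Notes on version B (the rewrite author's own statement) =====
-- stated objective: alternative
-- what changed: Replaces the forward top-down dict DP (ways to reach each cell, plus a 'finished' accumulator) by a bottom-up list DP computed in reverse row order: ways-to-bottom per column, last row all 1, answer read off at the start column.
-- outside the precondition, e.g. on count_timelines(['S.', 'x', '..']): A returns 1, B raises IndexError
import Mathlib
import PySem

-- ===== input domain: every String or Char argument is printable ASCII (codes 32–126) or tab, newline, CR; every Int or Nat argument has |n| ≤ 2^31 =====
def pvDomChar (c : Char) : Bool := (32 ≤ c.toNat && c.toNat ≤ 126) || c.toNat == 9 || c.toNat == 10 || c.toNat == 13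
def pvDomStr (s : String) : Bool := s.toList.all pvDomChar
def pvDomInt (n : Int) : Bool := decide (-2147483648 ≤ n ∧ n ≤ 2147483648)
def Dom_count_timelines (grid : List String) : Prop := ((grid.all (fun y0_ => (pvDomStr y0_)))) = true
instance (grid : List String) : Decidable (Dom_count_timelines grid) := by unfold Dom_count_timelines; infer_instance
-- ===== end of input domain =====

-- B replaces A's forward dict DP (ways to reach each cell + a 'finished' counter) by a
-- bottom-up list DP in reverse row order (ways from each cell down off the last row).

-- ===== PORT A =====
-- A-side helper: the body of A's inner 'for (r, c), ways in dp.items()' loop, named so the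
-- proofs can refer to it; it is a step-for-step transliteration of that loop body.
-- grid[r][c] is ported as pyGetD on the row's character list (in range under Pre_).
def innerStep (grid : List String) (rows cols row : Int)
    (st2 : PySem.Dict (Int × Int) Int × Int) (item : (Int × Int) × Int) :
    PySem.Dict (Int × Int) Int × Int :=
  let r := item.1.1
  let c := item.1.2
  let ways := item.2
  if r ≠ row then st2
  else if rows ≤ r + 1 then (st2.1, st2.2 + ways)
  else
    let cell := PySem.List.pyGetD (PySem.List.pyGetD grid r "").toList c ' '
    if cell = '^' then
      let st3 := if 0 ≤ c - 1 then
          (st2.1.insert (r + 1, c - 1) (st2.1.getD (r + 1, c - 1) 0 + ways), st2.2)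
        else st2
      if c + 1 < cols then
        (st3.1.insert (r + 1, c + 1) (st3.1.getD (r + 1, c + 1) 0 + ways), st3.2)
      else st3
    else (st2.1.insert (r + 1, c) (st2.1.getD (r + 1, c) 0 + ways), st2.2)

def count_timelines (grid : List String) : Int :=
  let rows : Int := PySem.List.len grid
  let cols : Int := PySem.List.len (PySem.List.pyGetD grid 0 "").toList
  let start_col : Int := (((PySem.List.index? (PySem.List.pyGetD grid 0 "").toList 'S').getD 0 : Nat) : Int)
  let dp0 : PySem.Dict (Int × Int) Int := (PySem.Dict.empty).insert (0, start_col) 1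
  let res := (PySem.List.pyRange 0 rows 1).foldl
    (fun (st : PySem.Dict (Int × Int) Int × Int) row =>
      st.1.items.foldl (innerStep grid rows cols row) (PySem.Dict.empty, st.2))
    (dp0, 0)
  res.2 + (PySem.Dict.values res.1).sum

-- ===== PORT B =====
-- B-side helper: one reverse-order row step of Source B (the inner 'for c in range(cols)' loop),
-- named so the proofs can refer to it; a step-for-step transliteration of that loop.
def bRowStep (grid : List String) (cols : Int) (below : List Int) (r : Int) : List Int :=
  let row := (PySem.List.pyGetD grid r "").toList
  (PySem.List.pyRange 0 cols 1).foldl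
    (fun cur c =>
      cur ++ [if PySem.List.pyGetD row c ' ' = '^' then
                (if 1 ≤ c then PySem.List.pyGetD below (c - 1) 0 else 0)
                  + (if c + 1 < cols then PySem.List.pyGetD below (c + 1) 0 else 0)
              else PySem.List.pyGetD below c 0]) []

def count_timelines_alt (grid : List String) : Int :=
  let cols : Int := PySem.List.len (PySem.List.pyGetD grid 0 "").toList
  let below : List Int := (PySem.List.pyRange (PySem.List.len grid - 2) (-1) (-1)).foldl
    (bRowStep grid cols) (List.replicate cols.toNat 1)
  PySem.List.pyGetD below
    (((PySem.List.index? (PySem.List.pyGetD grid 0 "").toList 'S').getD 0 : Nat) : Int) 0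

-- ===== PRECONDITION & SPEC =====
-- Pre_ excludes: the empty grid and grids whose first row has no 'S' (A raises IndexError /
-- ValueError there), and grids where some non-last row is shorter than the first row — there
-- B's full-width table raises IndexError, and A raises too unless the short stretch happens
-- to be unreachable from 'S'.
def Pre_count_timelines (grid : List String) : Prop :=
  grid ≠ [] ∧ 'S' ∈ (grid.headD "").toList ∧
    ∀ s ∈ grid.dropLast, (grid.headD "").toList.length ≤ s.toList.length
instance (grid : List String) : Decidable (Pre_count_timelines grid) := by
  unfold Pre_count_timelines; infer_instance
def pvWitness_count_timelines : List String := (["S^", ".."])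
def Spec_count_timelines (grid : List String) (out : Int) : Prop := out = count_timelines_alt grid
instance (grid : List String) (out : Int) : Decidable (Spec_count_timelines grid out) := by unfold Spec_count_timelines; infer_instance

-- ===== CLAIM (what is proved, stated in full; the proofs are below) =====
def Claim_equal_count_timelines : Prop := ∀ (grid : List String), Dom_count_timelines grid → Pre_count_timelines grid → Spec_count_timelines grid (count_timelines grid)

-- ===== LEMMAS AND PROOFS =====

-- Proof-side abbreviations for the quantities both ports compute.
def gcols (grid : List String) : Int := PySem.List.len (PySem.List.pyGetD grid 0 "").toList

def sIdx (grid : List String) : Int :=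
  (((PySem.List.index? (PySem.List.pyGetD grid 0 "").toList 'S').getD 0 : Nat) : Int)

-- The bottom-up table B computes: ways from row k down off the last row, per column.
def bTab (grid : List String) (k : Nat) : List Int :=
  if k + 1 < grid.length then bRowStep grid (gcols grid) (bTab grid (k + 1)) (k : Int)
  else List.replicate (gcols grid).toNat 1
termination_by grid.length - k

-- Value of a dp key under the bottom-up table, and total weight of a dict.
def pvVal (grid : List String) (k : Int × Int) : Int :=
  PySem.List.pyGetD (bTab grid k.1.toNat) k.2 0

def pvWt (grid : List String) (d : PySem.Dict (Int × Int) Int) : Int :=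
  (d.keys.map (fun k => d.getD k 0 * pvVal grid k)).sum

def pvShape (cols rlev : Int) (d : PySem.Dict (Int × Int) Int) : Prop :=
  ∀ k ∈ d.keys, k.1 = rlev ∧ 0 ≤ k.2 ∧ k.2 < cols

-- A's outer loop body, named for the proofs (definitionally the port's lambda).
def pvA_body (grid : List String) (rows cols : Int)
    (st : PySem.Dict (Int × Int) Int × Int) (row : Int) :
    PySem.Dict (Int × Int) Int × Int :=
  st.1.items.foldl (innerStep grid rows cols row) (PySem.Dict.empty, st.2)

lemma pv_gcols_nonneg (grid : List String) : 0 ≤ gcols grid := by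
  simp [gcols, PySem.List.len_eq]

lemma pv_wt_empty (grid : List String) : pvWt grid PySem.Dict.empty = 0 := by
  simp [pvWt, PySem.Dict.keys_empty]

lemma pv_sum_map_update {α : Type} (l : List α) (f g : α → Int) (k : α)
    (hnd : l.Nodup) (hk : k ∈ l) (hfg : ∀ x ∈ l, x ≠ k → f x = g x) :
    (l.map f).sum = (l.map g).sum + (f k - g k) := by
  induction l with
  | nil => cases hk
  | cons a l ih =>
    rcases List.mem_cons.mp hk with h | h
    · subst h
      have hrest : ∀ x ∈ l, f x = g x := fun x hx =>
        hfg x (List.mem_cons_of_mem _ hx)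
          (fun he => (List.nodup_cons.mp hnd).1 (he ▸ hx))
      simp [List.map_congr_left hrest]; ring
    · have hne : a ≠ k := fun he => (List.nodup_cons.mp hnd).1 (he ▸ h)
      have hl := ih (List.nodup_cons.mp hnd).2 h
        (fun x hx hxk => hfg x (List.mem_cons_of_mem _ hx) hxk)
      simp only [List.map_cons, List.sum_cons, hl, hfg a List.mem_cons_self hne]; ring

lemma pvWt_insert (grid : List String) (d : PySem.Dict (Int × Int) Int)
    (hnd : d.keys.Nodup) (k : Int × Int) (w : Int) :
    pvWt grid (d.insert k (d.getD k 0 + w)) = pvWt grid d + w * pvVal grid k := by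
  by_cases hc : d.contains k = true
  · have hkeys := PySem.Dict.keys_insert_of_contains d (v := d.getD k 0 + w) hc
    have hkmem := (PySem.Dict.contains_iff_mem_keys d k).mp hc
    have hupd := pv_sum_map_update d.keys
      (fun k' => (d.insert k (d.getD k 0 + w)).getD k' 0 * pvVal grid k')
      (fun k' => d.getD k' 0 * pvVal grid k') k hnd hkmem
      (fun x hx hxk => by simp only [PySem.Dict.getD_insert]; rw [if_neg hxk])
    unfold pvWt
    rw [hkeys, hupd]
    simp only [PySem.Dict.getD_insert_self]
    ring
  · have hc' : d.contains k = false := by simpa using hc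
    have hkeys := PySem.Dict.keys_insert_of_not_contains d (v := d.getD k 0 + w) hc'
    have hknot : k ∉ d.keys := fun hm => by
      rw [(PySem.Dict.contains_iff_mem_keys d k).mpr hm] at hc'; cases hc'
    have hcongr : ∀ x ∈ d.keys,
        (fun k' => (d.insert k (d.getD k 0 + w)).getD k' 0 * pvVal grid k') x
          = (fun k' => d.getD k' 0 * pvVal grid k') x := by
      intro x hx
      simp only [PySem.Dict.getD_insert]
      rw [if_neg (fun he : x = k => hknot (he ▸ hx))]
    unfold pvWt
    rw [hkeys, List.map_append, List.sum_append, List.map_congr_left hcongr]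
    simp only [List.map_cons, List.map_nil, List.sum_cons, List.sum_nil,
      PySem.Dict.getD_insert_self, PySem.Dict.getD_of_not_contains d 0 hc']
    ring

lemma pv_bRowStep_getD (grid : List String) (cols : Int) (below : List Int) (r c : Int)
    (h0 : 0 ≤ c) (hc : c < cols) :
    PySem.List.pyGetD (bRowStep grid cols below r) c 0 =
      if PySem.List.pyGetD (PySem.List.pyGetD grid r "").toList c ' ' = '^' then
        (if 1 ≤ c then PySem.List.pyGetD below (c - 1) 0 else 0)
          + (if c + 1 < cols then PySem.List.pyGetD below (c + 1) 0 else 0)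
      else PySem.List.pyGetD below c 0 := by
  unfold bRowStep
  rw [PySem.List.foldl_append_singleton_eq_map, List.nil_append]
  exact PySem.List.pyGetD_map_pyRange_of_nonneg _ cols c 0 h0 hc

lemma pv_val_last (grid : List String) (r c : Int)
    (hr : ¬ (r.toNat + 1 < grid.length)) (h0 : 0 ≤ c) (hc : c < gcols grid) :
    pvVal grid (r, c) = 1 := by
  have hg := pv_gcols_nonneg grid
  unfold pvVal
  rw [bTab, if_neg hr]
  have hlen : c < ((List.replicate (gcols grid).toNat (1 : Int)).length : Int) := by
    rw [List.length_replicate]; omega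
  rw [PySem.List.pyGetD_eq_getElem _ 0 h0 hlen]
  simp

lemma pv_val_step (grid : List String) (r c : Int) (h0r : 0 ≤ r)
    (hr : r + 1 < (grid.length : Int)) (h0 : 0 ≤ c) (hc : c < gcols grid) :
    pvVal grid (r, c) =
      if PySem.List.pyGetD (PySem.List.pyGetD grid r "").toList c ' ' = '^' then
        (if 1 ≤ c then pvVal grid (r + 1, c - 1) else 0)
          + (if c + 1 < gcols grid then pvVal grid (r + 1, c + 1) else 0)
      else pvVal grid (r + 1, c) := by
  have hlt : r.toNat + 1 < grid.length := by omega
  have hcast : ((r.toNat : Int)) = r := Int.toNat_of_nonneg h0r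
  have h1 : ((r : Int) + 1).toNat = r.toNat + 1 := by omega
  unfold pvVal
  rw [bTab, if_pos hlt, hcast, pv_bRowStep_getD grid _ _ r c h0 hc]
  simp [h1]

lemma pv_inner_last (grid : List String) (rows cols row : Int) (hrow : rows ≤ row + 1)
    (its : List ((Int × Int) × Int)) (hits : ∀ it ∈ its, it.1.1 = row)
    (nd : PySem.Dict (Int × Int) Int) (fin : Int) :
    its.foldl (innerStep grid rows cols row) (nd, fin)
      = (nd, fin + (its.map (·.2)).sum) := by
  induction its generalizing fin with
  | nil => simp
  | cons a l ih =>
    have ha := hits a List.mem_cons_self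
    have hstep : innerStep grid rows cols row (nd, fin) a = (nd, fin + a.2) := by
      unfold innerStep
      simp only [ha, ne_eq, not_true_eq_false, if_false]
      rw [if_pos (by omega : rows ≤ row + 1)]
    rw [List.foldl_cons, hstep, ih (fun it hit => hits it (List.mem_cons_of_mem _ hit))]
    simp [add_assoc]

lemma pv_insert_step (grid : List String) (cols row : Int)
    (d : PySem.Dict (Int × Int) Int) (hnd : d.keys.Nodup)
    (hsh : pvShape cols (row + 1) d) (c' w : Int) (h0 : 0 ≤ c') (hc : c' < cols) :
    (d.insert (row + 1, c') (d.getD (row + 1, c') 0 + w)).keys.Nodup ∧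
      pvShape cols (row + 1) (d.insert (row + 1, c') (d.getD (row + 1, c') 0 + w)) ∧
      pvWt grid (d.insert (row + 1, c') (d.getD (row + 1, c') 0 + w))
        = pvWt grid d + w * pvVal grid (row + 1, c') := by
  refine ⟨PySem.Dict.nodup_keys_insert d _ _ hnd, ?_, pvWt_insert grid d hnd _ w⟩
  intro k hk
  rcases (PySem.Dict.mem_keys_insert d _ k _).mp hk with h | h
  · subst h; exact ⟨rfl, h0, hc⟩
  · exact hsh k h

lemma pv_inner_mid (grid : List String) (rows cols row : Int) (h0r : 0 ≤ row)
    (hrows : row + 1 < rows) (hlen : rows = (grid.length : Int)) (hcols : cols = gcols grid)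
    (its : List ((Int × Int) × Int))
    (hits : ∀ it ∈ its, it.1.1 = row ∧ 0 ≤ it.1.2 ∧ it.1.2 < cols) :
    ∀ (nd : PySem.Dict (Int × Int) Int) (fin : Int), nd.keys.Nodup →
      pvShape cols (row + 1) nd →
      (its.foldl (innerStep grid rows cols row) (nd, fin)).2 = fin ∧
      (its.foldl (innerStep grid rows cols row) (nd, fin)).1.keys.Nodup ∧
      pvShape cols (row + 1) (its.foldl (innerStep grid rows cols row) (nd, fin)).1 ∧
      pvWt grid (its.foldl (innerStep grid rows cols row) (nd, fin)).1
        = pvWt grid nd + (its.map (fun it => it.2 * pvVal grid it.1)).sum := by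
  induction its with
  | nil => intro nd fin hnd hsh; exact ⟨rfl, hnd, hsh, by simp⟩
  | cons a l ih =>
    intro nd fin hnd hsh
    obtain ⟨⟨r, c⟩, w⟩ := a
    obtain ⟨ha1, ha2, ha3⟩ := hits ((r, c), w) List.mem_cons_self
    dsimp at ha1 ha2 ha3
    subst ha1
    have hval := pv_val_step grid r c h0r (by omega) ha2 (hcols ▸ ha3)
    rw [← hcols] at hval
    have hnle : ¬ rows ≤ r + 1 := by omega
    rw [List.foldl_cons]
    have hits' := fun it hit => hits it (List.mem_cons_of_mem _ hit)
    by_cases hcell : PySem.List.pyGetD (PySem.List.pyGetD grid r "").toList c ' ' = '^'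
    · rw [if_pos hcell] at hval
      by_cases hl : (1:Int) ≤ c <;> by_cases hr2 : c + 1 < cols
      · have hstep : innerStep grid rows cols r (nd, fin) ((r, c), w) =
            (((nd.insert (r + 1, c - 1) (nd.getD (r + 1, c - 1) 0 + w)).insert (r + 1, c + 1)
               ((nd.insert (r + 1, c - 1) (nd.getD (r + 1, c - 1) 0 + w)).getD (r + 1, c + 1) 0 + w)), fin) := by
          unfold innerStep
          simp [hnle, hcell, hl, hr2]
        obtain ⟨n1, s1, w1⟩ := pv_insert_step grid cols r nd hnd hsh (c - 1) w (by omega) (by omega)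
        obtain ⟨n2, s2, w2⟩ := pv_insert_step grid cols r _ n1 s1 (c + 1) w (by omega) hr2
        rw [hstep]
        obtain ⟨p1, p2, p3, p4⟩ := ih hits' _ fin n2 s2
        refine ⟨p1, p2, p3, ?_⟩
        rw [p4, w2, w1]
        simp only [List.map_cons, List.sum_cons]
        rw [hval, if_pos hl, if_pos hr2]
        ring
      · have hstep : innerStep grid rows cols r (nd, fin) ((r, c), w) =
            ((nd.insert (r + 1, c - 1) (nd.getD (r + 1, c - 1) 0 + w)), fin) := by
          unfold innerStep
          simp [hnle, hcell, hl, hr2]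
        obtain ⟨n1, s1, w1⟩ := pv_insert_step grid cols r nd hnd hsh (c - 1) w (by omega) (by omega)
        rw [hstep]
        obtain ⟨p1, p2, p3, p4⟩ := ih hits' _ fin n1 s1
        refine ⟨p1, p2, p3, ?_⟩
        rw [p4, w1]
        simp only [List.map_cons, List.sum_cons]
        rw [hval, if_pos hl, if_neg hr2]
        ring
      · have hstep : innerStep grid rows cols r (nd, fin) ((r, c), w) =
            ((nd.insert (r + 1, c + 1) (nd.getD (r + 1, c + 1) 0 + w)), fin) := by
          unfold innerStep
          simp [hnle, hcell, hl, hr2]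
        obtain ⟨n1, s1, w1⟩ := pv_insert_step grid cols r nd hnd hsh (c + 1) w (by omega) hr2
        rw [hstep]
        obtain ⟨p1, p2, p3, p4⟩ := ih hits' _ fin n1 s1
        refine ⟨p1, p2, p3, ?_⟩
        rw [p4, w1]
        simp only [List.map_cons, List.sum_cons]
        rw [hval, if_neg hl, if_pos hr2]
        ring
      · have hstep : innerStep grid rows cols r (nd, fin) ((r, c), w) = (nd, fin) := by
          unfold innerStep
          simp [hnle, hcell, hl, hr2]
        rw [hstep]
        obtain ⟨p1, p2, p3, p4⟩ := ih hits' nd fin hnd hsh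
        refine ⟨p1, p2, p3, ?_⟩
        rw [p4]
        simp only [List.map_cons, List.sum_cons]
        rw [hval, if_neg hl, if_neg hr2]
        ring
    · rw [if_neg hcell] at hval
      have hstep : innerStep grid rows cols r (nd, fin) ((r, c), w) =
          ((nd.insert (r + 1, c) (nd.getD (r + 1, c) 0 + w)), fin) := by
        unfold innerStep
        simp [hnle, hcell]
      obtain ⟨n1, s1, w1⟩ := pv_insert_step grid cols r nd hnd hsh c w ha2 ha3
      rw [hstep]
      obtain ⟨p1, p2, p3, p4⟩ := ih hits' _ fin n1 s1
      refine ⟨p1, p2, p3, ?_⟩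
      rw [p4, w1]
      simp only [List.map_cons, List.sum_cons]
      rw [hval]
      ring

lemma pv_items_sum (grid : List String) (d : PySem.Dict (Int × Int) Int)
    (hnd : d.keys.Nodup) :
    (d.items.map (fun it => it.2 * pvVal grid it.1)).sum = pvWt grid d := by
  rw [PySem.Dict.items_eq_map_keys d hnd 0, List.map_map]
  simp [pvWt, Function.comp_def, mul_comm]

lemma pv_sIdx_bounds (grid : List String)
    (h : 'S' ∈ (PySem.List.pyGetD grid 0 "").toList) :
    0 ≤ sIdx grid ∧ sIdx grid < gcols grid := by
  have hsome : (PySem.List.index? (PySem.List.pyGetD grid 0 "").toList 'S').isSome :=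
    (PySem.List.index?_isSome_iff _ _).mpr h
  obtain ⟨k, hk⟩ := Option.isSome_iff_exists.mp hsome
  obtain ⟨hlt, -, -⟩ := PySem.List.getElem_of_index?_eq_some hk
  unfold sIdx gcols
  rw [hk]
  simp only [Option.getD_some]
  refine ⟨by positivity, ?_⟩
  rw [PySem.List.len_eq]
  exact_mod_cast hlt

lemma pv_outer (grid : List String) (rows cols : Int)
    (hlen : rows = (grid.length : Int)) (hcols : cols = gcols grid)
    (hS : 'S' ∈ (PySem.List.pyGetD grid 0 "").toList) :
    ∀ m : Nat, (m : Int) ≤ rows - 1 →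
      ((PySem.List.pyRange 0 (m : Int)).foldl (pvA_body grid rows cols)
          ((PySem.Dict.empty).insert (0, sIdx grid) 1, 0)).1.keys.Nodup ∧
      pvShape cols (m : Int)
        ((PySem.List.pyRange 0 (m : Int)).foldl (pvA_body grid rows cols)
          ((PySem.Dict.empty).insert (0, sIdx grid) 1, 0)).1 ∧
      ((PySem.List.pyRange 0 (m : Int)).foldl (pvA_body grid rows cols)
          ((PySem.Dict.empty).insert (0, sIdx grid) 1, 0)).2
        + pvWt grid
          ((PySem.List.pyRange 0 (m : Int)).foldl (pvA_body grid rows cols)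
            ((PySem.Dict.empty).insert (0, sIdx grid) 1, 0)).1
        = pvVal grid (0, sIdx grid) := by
  intro m
  induction m with
  | zero =>
    intro hm
    obtain ⟨hs0, hs1⟩ := pv_sIdx_bounds grid hS
    simp only [Nat.cast_zero]
    rw [PySem.List.pyRange_one_eq_nil le_rfl, List.foldl_nil]
    have hkeys := PySem.Dict.keys_insert_of_not_contains
      (PySem.Dict.empty (κ := Int × Int) (ν := Int)) (v := (1:Int))
      (k := ((0:Int), sIdx grid)) (PySem.Dict.contains_empty _)
    rw [PySem.Dict.keys_empty, List.nil_append] at hkeys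
    refine ⟨by rw [hkeys]; simp, ?_, ?_⟩
    · intro k hk
      rw [hkeys] at hk
      rcases List.mem_singleton.mp hk with rfl
      exact ⟨by norm_num, hs0, by rw [hcols]; exact hs1⟩
    · simp only [pvWt, hkeys, List.map_cons, List.map_nil, List.sum_cons, List.sum_nil]
      rw [PySem.Dict.getD_insert_self]
      ring
  | succ n ih =>
    intro hm
    have hcast : ((n + 1 : Nat) : Int) = (n : Int) + 1 := by push_cast; ring
    rw [hcast, PySem.List.pyRange_one_succ_right (by positivity), List.foldl_append,
      List.foldl_cons, List.foldl_nil]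
    have hm' : ((n : Nat) : Int) ≤ rows - 1 := by omega
    obtain ⟨hnd, hsh, hwt⟩ := ih hm'
    set st := (PySem.List.pyRange 0 (n : Int)).foldl (pvA_body grid rows cols)
      ((PySem.Dict.empty).insert (0, sIdx grid) 1, 0) with hst
    have hits : ∀ it ∈ st.1.items, it.1.1 = (n : Int) ∧ 0 ≤ it.1.2 ∧ it.1.2 < cols :=
      fun it hit => hsh it.1 (PySem.Dict.mem_keys_of_mem_items st.1 hit)
    have hempty : pvShape cols ((n : Int) + 1) PySem.Dict.empty := by
      intro k hk
      rw [PySem.Dict.keys_empty] at hk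
      cases hk
    obtain ⟨q1, q2, q3, q4⟩ := pv_inner_mid grid rows cols (n : Int) (by positivity)
      (by omega) hlen hcols st.1.items hits PySem.Dict.empty st.2
      PySem.Dict.nodup_keys_empty hempty
    refine ⟨q2, q3, ?_⟩
    show (pvA_body grid rows cols st (n : Int)).2 + pvWt grid (pvA_body grid rows cols st (n : Int)).1 = _
    unfold pvA_body
    rw [q1, q4, pv_wt_empty, pv_items_sum grid st.1 hnd, zero_add]
    exact hwt

lemma pv_b_fold (grid : List String) :
    ∀ k : Nat, k ≤ grid.length - 1 →
      (PySem.List.pyRange ((k : Int) - 1) (-1) (-1)).foldl (bRowStep grid (gcols grid))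
        (bTab grid k) = bTab grid 0 := by
  intro k
  induction k with
  | zero =>
    intro _
    rw [PySem.List.pyRange_neg_one_eq_nil (by omega), List.foldl_nil]
  | succ n ih =>
    intro hk
    have hc : ((n + 1 : Nat) : Int) - 1 = (n : Int) := by push_cast; ring
    rw [hc, PySem.List.pyRange_neg_one_cons (by omega), List.foldl_cons]
    have hstep : bRowStep grid (gcols grid) (bTab grid (n + 1)) (n : Int) = bTab grid n := by
      conv_rhs => rw [bTab]
      rw [if_pos (by omega)]
    rw [hstep]
    exact ih (by omega)

lemma pv_alt_eq (grid : List String) (hne : grid ≠ []) :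
    count_timelines_alt grid = PySem.List.pyGetD (bTab grid 0) (sIdx grid) 0 := by
  have hn : 1 ≤ grid.length := List.length_pos_iff.mpr hne
  simp only [count_timelines_alt]
  rw [show (PySem.List.len (PySem.List.pyGetD grid 0 "").toList) = gcols grid from rfl]
  rw [show ((((PySem.List.index? (PySem.List.pyGetD grid 0 "").toList 'S').getD 0 : Nat)) : Int)
      = sIdx grid from rfl]
  rw [show PySem.List.len grid - 2 = ((grid.length - 1 : Nat) : Int) - 1 by
    rw [PySem.List.len_eq]; omega]
  rw [show (List.replicate (gcols grid).toNat (1:Int)) = bTab grid (grid.length - 1) by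
    rw [bTab, if_neg (by omega)]]
  rw [pv_b_fold grid (grid.length - 1) le_rfl]

lemma pv_values_empty_sum : ((PySem.Dict.empty : PySem.Dict (Int × Int) Int).values).sum = 0 := by
  rw [PySem.Dict.values_eq_map_keys _ PySem.Dict.nodup_keys_empty 0, PySem.Dict.keys_empty]
  rfl

lemma pv_a_eq (grid : List String) (hne : grid ≠ [])
    (hS : 'S' ∈ (PySem.List.pyGetD grid 0 "").toList) :
    count_timelines grid = pvVal grid (0, sIdx grid) := by
  have hn : 1 ≤ grid.length := List.length_pos_iff.mpr hne
  simp only [count_timelines]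
  rw [show ((((PySem.List.index? (PySem.List.pyGetD grid 0 "").toList 'S').getD 0 : Nat)) : Int)
      = sIdx grid from rfl]
  rw [show PySem.List.len grid = ((grid.length - 1 : Nat) : Int) + 1 by
    rw [PySem.List.len_eq]; omega]
  rw [show (fun (st : PySem.Dict (Int × Int) Int × Int) (row : Int) =>
        List.foldl (innerStep grid (((grid.length - 1 : Nat) : Int) + 1)
          (PySem.List.len (PySem.List.pyGetD grid 0 "").toList) row)
          (PySem.Dict.empty, st.2) st.1.items)
      = pvA_body grid (((grid.length - 1 : Nat) : Int) + 1)
          (PySem.List.len (PySem.List.pyGetD grid 0 "").toList) from rfl]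
  rw [PySem.List.pyRange_one_succ_right (by positivity), List.foldl_append,
    List.foldl_cons, List.foldl_nil]
  obtain ⟨hnd, hsh, hwt⟩ := pv_outer grid (((grid.length - 1 : Nat) : Int) + 1)
    (PySem.List.len (PySem.List.pyGetD grid 0 "").toList)
    (by omega) rfl hS (grid.length - 1) (by omega)
  set st := (PySem.List.pyRange 0 ((grid.length - 1 : Nat) : Int)).foldl
    (pvA_body grid (((grid.length - 1 : Nat) : Int) + 1)
      (PySem.List.len (PySem.List.pyGetD grid 0 "").toList))
    ((PySem.Dict.empty).insert (0, sIdx grid) 1, 0) with hst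
  have hlast := pv_inner_last grid (((grid.length - 1 : Nat) : Int) + 1)
    (PySem.List.len (PySem.List.pyGetD grid 0 "").toList) ((grid.length - 1 : Nat) : Int)
    le_rfl st.1.items
    (fun it hit => (hsh it.1 (PySem.Dict.mem_keys_of_mem_items st.1 hit)).1)
    PySem.Dict.empty st.2
  have hpa : pvA_body grid (((grid.length - 1 : Nat) : Int) + 1)
      (PySem.List.len (PySem.List.pyGetD grid 0 "").toList) st ((grid.length - 1 : Nat) : Int)
      = (PySem.Dict.empty, st.2 + (st.1.items.map (·.2)).sum) := hlast
  rw [hpa]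
  have hmap : st.1.items.map (fun it : (Int × Int) × Int => it.2)
      = st.1.items.map (fun it => it.2 * pvVal grid it.1) := by
    refine List.map_congr_left (fun it hit => ?_)
    obtain ⟨he, h0, hcval⟩ := hsh it.1 (PySem.Dict.mem_keys_of_mem_items st.1 hit)
    have h1 : pvVal grid (it.1.1, it.1.2) = 1 := by
      refine pv_val_last grid it.1.1 it.1.2 ?_ h0 hcval
      rw [he]
      simp only [Int.toNat_natCast]
      omega
    rw [show pvVal grid it.1 = pvVal grid (it.1.1, it.1.2) from rfl, h1, mul_one]
  show st.2 + (st.1.items.map (·.2)).sum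
      + ((PySem.Dict.empty : PySem.Dict (Int × Int) Int).values).sum = pvVal grid (0, sIdx grid)
  rw [pv_values_empty_sum, add_zero, hmap, pv_items_sum grid st.1 hnd]
  exact hwt

-- ===== VERDICT (by name: the statement is the Claim_ definition above) =====
theorem count_timelines_spec : Claim_equal_count_timelines := by
  intro grid _ hpre
  obtain ⟨hne, hS0, hrect⟩ := hpre
  have hS : 'S' ∈ (PySem.List.pyGetD grid 0 "").toList := by
    cases grid with
    | nil => exact absurd rfl hne
    | cons g t => simpa [PySem.List.pyGetD_zero_cons] using hS0
  show count_timelines grid = count_timelines_alt grid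
  rw [pv_a_eq grid hne hS, pv_alt_eq grid hne]
  rfl
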